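-- pv_equiv track=rewrite | github.com/tae-yeop/fas_lab | moire_generation/pix2pix-turbo/dataset.py | crop_caption
-- ===== SOURCE A (Python) =====
-- def crop_caption(caption, max_words=77):
--     sentences = caption.split('. ')
--     selected_text = []
--     current_word_count = 0
--
--     for sentence in sentences:
--         words_in_sentence = len(sentence.split())
--         if current_word_count + words_in_sentence <= max_words:
--             selected_text.append(sentence)
--             current_word_count += words_in_sentence
--         else:
--             break
--
--     final_text = '. '.join(selected_text)
--     return final_text
-- ===== SOURCE B (Python) =====
-- def crop_caption(caption, max_words=77):
--     # Prefix-sum decomposition: per-sentence word counts, running totals,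
--     # cut at the first total exceeding max_words, join the kept prefix.
--     sentences = caption.split('. ')
--     counts = [len(s.split()) for s in sentences]
--     cums = [sum(counts[:i + 1]) for i in range(len(counts))]
--     keep = next((i for i, c in enumerate(cums) if c > max_words), len(cums))
--     return '. '.join(sentences[:keep])
-- ===== Notes on version B (the rewrite author's own statement) =====
-- stated objective: alternative
-- what changed: Replaces A's single accumulate-and-break loop with a prefix-sum pipeline: build per-sentence word counts, build the list of running cumulative totals, find the first index whose total exceeds max_words, and join that prefix of sentences.
import Mathlib
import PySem

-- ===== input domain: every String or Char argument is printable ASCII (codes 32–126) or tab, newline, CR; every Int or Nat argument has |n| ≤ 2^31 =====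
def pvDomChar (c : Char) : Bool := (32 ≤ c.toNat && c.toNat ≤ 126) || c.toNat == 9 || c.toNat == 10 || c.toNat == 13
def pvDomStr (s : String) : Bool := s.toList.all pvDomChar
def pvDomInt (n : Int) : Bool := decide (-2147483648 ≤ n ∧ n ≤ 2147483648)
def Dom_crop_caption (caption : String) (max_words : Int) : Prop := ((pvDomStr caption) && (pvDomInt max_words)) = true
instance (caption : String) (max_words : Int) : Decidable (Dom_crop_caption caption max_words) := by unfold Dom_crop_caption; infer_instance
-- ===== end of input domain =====

-- B replaces A's accumulate-and-break loop by prefix sums + cut index; same values, alternative decomposition.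

-- ===== PORT A =====
-- A's for-loop with accumulator and break
def cropLoopA (mw : Int) : List String → List String → Int → List String
  | [], selected, _ => selected
  | s :: rest, selected, cnt =>
    let w : Int := (PySem.Str.split₀ s).length
    if cnt + w ≤ mw then cropLoopA mw rest (selected ++ [s]) (cnt + w)
    else selected

def crop_caption (caption : String) (max_words : Int) : String :=
  -- split? is some here since ". " ≠ "" — getD [] is never the fallback
  let sentences := (PySem.Str.split? caption ". ").getD []
  PySem.Str.join ". " (cropLoopA max_words sentences [] 0)

-- ===== PORT B =====
-- cums[i] = sum(counts[:i+1])
def cumsB (counts : List Int) : List Int :=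
  (List.range counts.length).map (fun i => (counts.take (i + 1)).sum)

def crop_caption_alt (caption : String) (max_words : Int) : String :=
  let sentences := (PySem.Str.split? caption ". ").getD []
  let counts : List Int := sentences.map (fun s => ((PySem.Str.split₀ s).length : Int))
  let cums := cumsB counts
  -- next((i for i, c in enumerate(cums) if c > max_words), len(cums))
  let keep := (cums.findIdx? (fun c => decide (max_words < c))).getD cums.length
  PySem.Str.join ". " (sentences.take keep)

-- ===== PRECONDITION & SPEC =====
def Spec_crop_caption (caption : String) (max_words : Int) (out : String) : Prop := out = crop_caption_alt caption max_words
instance (caption : String) (max_words : Int) (out : String) : Decidable (Spec_crop_caption caption max_words out) := by unfold Spec_crop_caption; infer_instance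

-- ===== CLAIM (what is proved, stated in full; the proofs are below) =====
def Claim_equal_crop_caption : Prop := ∀ (caption : String) (max_words : Int), Dom_crop_caption caption max_words → Spec_crop_caption caption max_words (crop_caption caption max_words)

-- ===== LEMMAS AND PROOFS =====

/-- Common characterisation: the greedy prefix of sentences fitting the budget. -/
def takeSents : Int → List String → List String
  | _, [] => []
  | budget, s :: rest =>
    let w : Int := (PySem.Str.split₀ s).length
    if w ≤ budget then s :: takeSents (budget - w) rest else []

lemma cropLoopA_eq (mw : Int) (sents : List String) :
    ∀ (sel : List String) (cnt : Int),
      cropLoopA mw sents sel cnt = sel ++ takeSents (mw - cnt) sents := by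
  induction sents with
  | nil => intro sel cnt; simp [cropLoopA, takeSents]
  | cons s rest ih =>
    intro sel cnt
    simp only [cropLoopA, takeSents]
    by_cases h : cnt + ((PySem.Str.split₀ s).length : Int) ≤ mw
    · rw [if_pos h, if_pos (by omega), ih]
      have : mw - (cnt + ((PySem.Str.split₀ s).length : Int))
           = mw - cnt - ((PySem.Str.split₀ s).length : Int) := by omega
      simp [this]
    · rw [if_neg h, if_neg (by omega)]
      simp

lemma cumsB_cons (w : Int) (cs : List Int) :
    cumsB (w :: cs) = w :: (cumsB cs).map (fun d => w + d) := by
  simp [cumsB, List.range_succ_eq_map, List.map_map, Function.comp]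

lemma takeB_eq (sents : List String) : ∀ (mw : Int),
    sents.take (((cumsB (sents.map (fun s => ((PySem.Str.split₀ s).length : Int)))).findIdx?
        (fun c => decide (mw < c))).getD
        (cumsB (sents.map (fun s => ((PySem.Str.split₀ s).length : Int)))).length)
      = takeSents mw sents := by
  induction sents with
  | nil => intro mw; simp [cumsB, takeSents]
  | cons s rest ih =>
    intro mw
    set w : Int := ((PySem.Str.split₀ s).length : Int) with hw
    rw [List.map_cons, cumsB_cons, List.findIdx?_cons]
    by_cases h : mw < w
    · rw [if_pos (by simpa using h)]
      simp [takeSents, ← hw, not_le.mpr h]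
    · rw [if_neg (by simpa using h)]
      have hpred : (fun c => decide (mw < c)) ∘ (fun d => w + d)
          = (fun d => decide (mw - w < d)) := by
        funext d; simp only [Function.comp]
        by_cases hd : mw - w < d
        · rw [decide_eq_true hd, decide_eq_true (by omega)]
        · rw [decide_eq_false hd, decide_eq_false (by omega)]
      rw [List.findIdx?_map, hpred]
      rcases hfi : (cumsB (rest.map (fun s => ((PySem.Str.split₀ s).length : Int)))).findIdx?
          (fun d => decide (mw - w < d)) with _ | k
      · have := ih (mw - w); rw [hfi] at this
        simp only [Option.map_none, Option.getD_none, List.length_cons, List.length_map,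
          List.take_succ_cons]
        simp only [Option.getD_none] at this
        simp [takeSents, ← hw, not_lt.mp h, this]
      · have := ih (mw - w); rw [hfi] at this
        simp only [Option.map_some, Option.getD_some, List.take_succ_cons]
        simp only [Option.getD_some] at this
        simp [takeSents, ← hw, not_lt.mp h, this]

-- ===== VERDICT (by name: the statement is the Claim_ definition above) =====
theorem crop_caption_spec : Claim_equal_crop_caption := by
  intro caption max_words _
  unfold Spec_crop_caption crop_caption crop_caption_alt
  dsimp only
  rw [cropLoopA_eq, takeB_eq]
  simp
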